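-- pv_equiv track=rewrite | github.com/francis-fra/txtlib | utility.py | parse_network_dict
-- ===== SOURCE A (Python) =====
-- def parse_network_dict(d):
--     "convert the network graph to json"
--
--     def key_exists(node, nodelist):
--         "check if node exists"
--
--         for item in nodelist:
--             if node == item["id"]:
--                 return True
--
--         return False
--
--     data = {}
--     data['nodes'] = []
--     data['links'] = []
--
--     # parse linked graph
--     for key in d.keys():
--         linked_list = d[key]
--         if not key_exists(key, data["nodes"]):
--             # FIXME: fixed node value (circle size)
--             # FIXME: group??
--             item = {"id": key, "group": 1, "value": 5}
--             data["nodes"].append(item)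
--         for tp in linked_list:
--             # lined value
--             item = {"source": key, "target": tp[0], "value": tp[1]}
-- #             item = {"source": key, "target": tp[0], "value": 5}
--             data['links'].append(item)
--             # add node item
--             if not key_exists(tp[0], data["nodes"]):
--                 # FIXME: fixed node value (circle size)
--                 item = {"id": tp[0], "group": 1, "value": 5}
--                 data["nodes"].append(item)
--
--     return data
-- ===== SOURCE B (Python) =====
-- def parse_network_dict(d):
--     "convert the network graph to json"
--     # flatten every node id mention (each key followed by its targets), in order
--     seq = [x for key, linked in d.items() for x in (key, *(tp[0] for tp in linked))]
--     # dict.fromkeys keeps the first occurrence of each id, in order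
--     nodes = [{"id": x, "group": 1, "value": 5} for x in dict.fromkeys(seq)]
--     links = [{"source": key, "target": tp[0], "value": tp[1]}
--              for key, linked in d.items() for tp in linked]
--     return {"nodes": nodes, "links": links}
-- ===== Notes on version B (the rewrite author's own statement) =====
-- stated objective: idiomatic
-- what changed: Replaces A's single interleaved loop that mutates the nodes/links lists and rescans the growing node-dict list (key_exists) per candidate by a declarative pipeline: flatten all id mentions into one sequence, deduplicate it with dict.fromkeys (first occurrence, insertion order), and build nodes and links as two comprehensions.
import Mathlib
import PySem

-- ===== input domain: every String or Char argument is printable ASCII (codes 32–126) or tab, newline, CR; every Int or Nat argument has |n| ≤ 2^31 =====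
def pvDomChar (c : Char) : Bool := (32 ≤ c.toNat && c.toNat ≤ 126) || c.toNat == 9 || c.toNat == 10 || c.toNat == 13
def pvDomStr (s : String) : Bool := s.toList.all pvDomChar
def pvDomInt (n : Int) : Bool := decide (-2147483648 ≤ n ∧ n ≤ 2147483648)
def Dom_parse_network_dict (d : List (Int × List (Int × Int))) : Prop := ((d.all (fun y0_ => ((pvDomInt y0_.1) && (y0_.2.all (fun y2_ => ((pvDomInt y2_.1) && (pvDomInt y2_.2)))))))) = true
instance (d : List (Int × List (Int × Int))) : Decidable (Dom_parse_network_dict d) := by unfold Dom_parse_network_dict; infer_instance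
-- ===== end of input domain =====

-- B replaces A's interleaved mutating loop (linear key_exists rescans of the node list)
-- by a declarative pipeline: flatten all id mentions, dedup with dict.fromkeys, two comprehensions.

-- ===== PORT A =====
-- helper key_exists: linear scan of the node list comparing node == item["id"]
def pvKeyExists (node : Int) (nodelist : List (List (String × Int))) : Bool :=
  match nodelist with
  | [] => false
  | item :: rest =>
      if (List.lookup "id" item == some node) then true else pvKeyExists node rest

-- inner `for tp in linked_list` loop of A, threading (nodes, links)
def pvInnerA (key : Int) (tps : List (Int × Int))
    (nodes links : List (List (String × Int))) :
    List (List (String × Int)) × List (List (String × Int)) :=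
  match tps with
  | [] => (nodes, links)
  | tp :: rest =>
      let links := links ++ [[("source", key), ("target", tp.1), ("value", tp.2)]]
      let nodes :=
        if pvKeyExists tp.1 nodes then nodes
        else nodes ++ [[("id", tp.1), ("group", (1 : Int)), ("value", 5)]]
      pvInnerA key rest nodes links

-- outer `for key in d.keys()` loop; `d[key]` is the first-match lookup in d0
def pvOuterA (d0 : List (Int × List (Int × Int))) (ks : List Int)
    (nodes links : List (List (String × Int))) :
    List (List (String × Int)) × List (List (String × Int)) :=
  match ks with
  | [] => (nodes, links)
  | key :: rest =>
      let linked_list := (List.lookup key d0).getD []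
      let nodes :=
        if pvKeyExists key nodes then nodes
        else nodes ++ [[("id", key), ("group", (1 : Int)), ("value", 5)]]
      let st := pvInnerA key linked_list nodes links
      pvOuterA d0 rest st.1 st.2

def parse_network_dict (d : List (Int × List (Int × Int))) : List (String × List (List (String × Int))) :=
  let st := pvOuterA d (d.map Prod.fst) [] []
  [("nodes", st.1), ("links", st.2)]

-- ===== PORT B =====
def parse_network_dict_alt (d : List (Int × List (Int × Int))) : List (String × List (List (String × Int))) :=
  let seq := d.flatMap (fun p => p.1 :: p.2.map (fun tp => tp.1))
  let nodes := (PySem.List.dedup seq).map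
    (fun x => [("id", x), ("group", (1 : Int)), ("value", 5)])
  let links := d.flatMap (fun p =>
    p.2.map (fun tp => [("source", p.1), ("target", tp.1), ("value", tp.2)]))
  [("nodes", nodes), ("links", links)]

-- ===== PRECONDITION & SPEC =====
-- Pre_ excludes association lists with duplicate keys: those do not arise from a Python
-- dict (dict construction collapses them), so no list-level behaviour corresponds to Python there.
def Pre_parse_network_dict (d : List (Int × List (Int × Int))) : Prop :=
  (d.map Prod.fst).Nodup
instance (d : List (Int × List (Int × Int))) : Decidable (Pre_parse_network_dict d) := by
  unfold Pre_parse_network_dict; infer_instance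

def pvWitness_parse_network_dict : (List (Int × List (Int × Int))) :=
  [(1, [(2, 3), (1, 7)]), (2, [])]

def Spec_parse_network_dict (d : List (Int × List (Int × Int))) (out : List (String × List (List (String × Int)))) : Prop := out = parse_network_dict_alt d
instance (d : List (Int × List (Int × Int))) (out : List (String × List (List (String × Int)))) : Decidable (Spec_parse_network_dict d out) := by unfold Spec_parse_network_dict; infer_instance

-- ===== CLAIM =====
def Claim_equal_parse_network_dict : Prop := ∀ (d : List (Int × List (Int × Int))), Dom_parse_network_dict d → Pre_parse_network_dict d → Spec_parse_network_dict d (parse_network_dict d)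

-- ===== LEMMAS AND PROOFS =====

-- canonical node/link constructors
def pvNode (x : Int) : List (String × Int) := [("id", x), ("group", 1), ("value", 5)]
def pvLink (k : Int) (tp : Int × Int) : List (String × Int) :=
  [("source", k), ("target", tp.1), ("value", tp.2)]

theorem pvKeyExists_map (x : Int) (ids : List Int) :
    pvKeyExists x (ids.map pvNode) = ids.contains x := by
  induction ids with
  | nil => simp [pvKeyExists]
  | cons a l ih =>
      simp only [List.map_cons, pvKeyExists, pvNode, List.lookup, List.contains_cons]
      by_cases h : a = x
      · simp [h]
      · have h' : x ≠ a := fun hx => h hx.symm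
        simp [h, h', ih]

-- A's node accumulation is PySem.Set.add on the id list (in `ids.map pvNode` form)
theorem pvInnerA_spec (key : Int) (tps : List (Int × Int)) (ids : List Int)
    (links : List (List (String × Int))) :
    pvInnerA key tps (ids.map pvNode) links =
      (((tps.map Prod.fst).foldl PySem.Set.add ids).map pvNode,
        links ++ tps.map (pvLink key)) := by
  induction tps generalizing ids links with
  | nil => simp [pvInnerA]
  | cons tp rest ih =>
      simp only [pvInnerA, List.map_cons, List.foldl_cons, pvKeyExists_map]
      rw [show (if (ids.contains tp.1) = true then ids.map pvNode
            else ids.map pvNode ++ [[("id", tp.1), ("group", (1:Int)), ("value", 5)]]) =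
            (PySem.Set.add ids tp.1).map pvNode by
          unfold PySem.Set.add PySem.Set.contains; split_ifs <;> simp [pvNode]]
      rw [ih]
      simp [pvLink]

theorem pvOuterA_spec (d0 tail : List (Int × List (Int × Int)))
    (hlk : ∀ p ∈ tail, List.lookup p.1 d0 = some p.2)
    (ids : List Int) (links : List (List (String × Int))) :
    pvOuterA d0 (tail.map Prod.fst) (ids.map pvNode) links =
      (((tail.flatMap (fun p => p.1 :: p.2.map Prod.fst)).foldl PySem.Set.add ids).map pvNode,
        links ++ tail.flatMap (fun p => p.2.map (pvLink p.1))) := by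
  induction tail generalizing ids links with
  | nil => simp [pvOuterA]
  | cons p rest ih =>
      simp only [List.map_cons, pvOuterA, pvKeyExists_map, List.flatMap_cons,
        List.foldl_append, List.foldl_cons]
      rw [hlk p (by simp)]
      rw [show (if (ids.contains p.1) = true then ids.map pvNode
            else ids.map pvNode ++ [[("id", p.1), ("group", (1:Int)), ("value", 5)]]) =
            (PySem.Set.add ids p.1).map pvNode by
          unfold PySem.Set.add PySem.Set.contains; split_ifs <;> simp [pvNode]]
      rw [pvInnerA_spec]
      rw [ih (fun q hq => hlk q (List.mem_cons_of_mem _ hq))]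
      simp [List.append_assoc]

theorem pvLookup_of_nodup (d : List (Int × List (Int × Int)))
    (h : (d.map Prod.fst).Nodup) : ∀ p ∈ d, List.lookup p.1 d = some p.2 := by
  induction d with
  | nil => simp
  | cons q rest ih =>
      intro p hp
      rcases List.mem_cons.mp hp with hp | hp
      · simp [hp, List.lookup]
      · have hne : q.1 ≠ p.1 := by
          intro he
          have : p.1 ∈ rest.map Prod.fst := List.mem_map_of_mem hp
          rw [List.map_cons] at h
          exact (List.nodup_cons.mp h).1 (he ▸ this)
        have : (p.1 == q.1) = false := by
          simp [beq_eq_false_iff_ne]; exact fun he => hne he.symm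
        simp only [List.lookup, this]
        exact ih (List.nodup_cons.mp (by rw [List.map_cons] at h; exact h)).2 p hp

-- ===== VERDICT =====
theorem parse_network_dict_spec : Claim_equal_parse_network_dict := by
  intro d _ hpre
  unfold Spec_parse_network_dict parse_network_dict parse_network_dict_alt
  have hA := pvOuterA_spec d d (pvLookup_of_nodup d hpre) [] []
  simp only [List.map_nil, List.nil_append] at hA
  rw [hA]
  rfl
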